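-- pv_equiv track=rewrite | github.com/Vanilla0731/Zappy-AI | src/zappy/decision_engine.py | _get_path_to_tile
-- ===== SOURCE A (Python) =====
-- def _get_path_to_tile(tile_index: int) -> list:
--     """
--     Find the path to a tile and generate the sequence of commands to move to it.
--     """
--     if tile_index <= 0:
--         return []
--
--     path = []
--     level = 0
--     tiles_in_level = 1
--     # Calculate the depth of the tile
--     while tile_index >= tiles_in_level:
--         tile_index -= tiles_in_level
--         level += 1
--         tiles_in_level = 2 * level + 1
--     # Now tile_index is the index in the current level
--
--     # 1. Move to the correct level
--     path.extend(["Forward"] * level)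
--
--     # 2. Move to the correct tile in the level
--     center_of_level = level
--     if tile_index < center_of_level:
--         path.append("Left")
--         # Move to the left side of the level
--         path.extend(["Forward"] * (center_of_level - tile_index))
--     elif tile_index > center_of_level:
--         path.append("Right")
--         # Move to the right side of the level
--         path.extend(["Forward"] * (tile_index - center_of_level))
--     else:
--         # Already at the center of the level
--         pass
--     return path
-- ===== SOURCE B (Python) =====
-- def _isqrt(n: int) -> int:
--     # digit-by-digit (base-4) integer square root: isqrt(n) from isqrt(n // 4)
--     if n < 1:
--         return 0
--     r = 2 * _isqrt(n // 4)
--     return r + 1 if (r + 1) * (r + 1) <= n else r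
--
--
-- def _get_path_to_tile(tile_index: int) -> list:
--     if tile_index <= 0:
--         return []
--     # levels hold 1, 3, 5, ... tiles, so level L starts at index L*L
--     level = _isqrt(tile_index)
--     idx = tile_index - level * level
--     path = ["Forward"] * level
--     if idx < level:
--         path.append("Left")
--         path += ["Forward"] * (level - idx)
--     elif idx > level:
--         path.append("Right")
--         path += ["Forward"] * (idx - level)
--     return path
-- ===== Notes on version B (the rewrite author's own statement) =====
-- stated objective: simpler
-- what changed: Replaces the odd-number-subtracting while loop with a closed-form level computation: level = isqrt(tile_index) (sum of the first L odd numbers is L^2), idx = tile_index - level^2.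
import Mathlib
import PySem

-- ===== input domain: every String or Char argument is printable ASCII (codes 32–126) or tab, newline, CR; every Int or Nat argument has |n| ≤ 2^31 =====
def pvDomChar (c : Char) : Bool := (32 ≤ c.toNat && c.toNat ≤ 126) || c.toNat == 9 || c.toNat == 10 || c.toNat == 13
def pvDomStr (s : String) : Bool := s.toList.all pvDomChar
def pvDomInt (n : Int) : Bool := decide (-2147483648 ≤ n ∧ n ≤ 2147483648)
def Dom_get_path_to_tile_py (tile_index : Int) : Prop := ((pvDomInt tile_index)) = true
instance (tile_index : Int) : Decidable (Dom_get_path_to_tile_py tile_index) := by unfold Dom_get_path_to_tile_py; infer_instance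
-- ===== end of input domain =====

-- B replaces A's odd-number-subtracting while loop by a closed-form level = isqrt(tile_index); objective: simpler.

-- ===== PORT A =====
-- A's while loop: level is a Python int that is provably ≥ 0, kept as Nat for termination.
def pvLoopA (n : Int) (lvl : Nat) : Nat × Int :=
  if 2 * (lvl : Int) + 1 ≤ n then pvLoopA (n - (2 * (lvl : Int) + 1)) (lvl + 1)
  else (lvl, n)
termination_by n.toNat
decreasing_by omega

def get_path_to_tile_py (tile_index : Int) : List String :=
  if tile_index ≤ 0 then []
  else
    let p := pvLoopA tile_index 0
    let level := p.1
    let idx := p.2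
    let path := List.replicate level "Forward"
    let center : Int := (level : Int)
    if idx < center then path ++ ["Left"] ++ List.replicate (center - idx).toNat "Forward"
    else if center < idx then path ++ ["Right"] ++ List.replicate (idx - center).toNat "Forward"
    else path

-- ===== PORT B =====
-- digit-by-digit (base-4) integer square root, as in Source B
def pvIsqrt (n : Nat) : Nat :=
  if n < 1 then 0
  else
    let r := 2 * pvIsqrt (n / 4)
    if (r + 1) * (r + 1) ≤ n then r + 1 else r
termination_by n
decreasing_by exact Nat.div_lt_self (by omega) (by norm_num)

def get_path_to_tile_py_alt (tile_index : Int) : List String :=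
  if tile_index ≤ 0 then []
  else
    let level := pvIsqrt tile_index.toNat
    let idx : Int := tile_index - (level : Int) * (level : Int)
    let path := List.replicate level "Forward"
    if idx < (level : Int) then path ++ ["Left"] ++ List.replicate ((level : Int) - idx).toNat "Forward"
    else if (level : Int) < idx then path ++ ["Right"] ++ List.replicate (idx - (level : Int)).toNat "Forward"
    else path

-- ===== PRECONDITION & SPEC =====
def Spec_get_path_to_tile_py (tile_index : Int) (out : List String) : Prop := out = get_path_to_tile_py_alt tile_index
instance (tile_index : Int) (out : List String) : Decidable (Spec_get_path_to_tile_py tile_index out) := by unfold Spec_get_path_to_tile_py; infer_instance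

-- ===== CLAIM (what is proved, stated in full; the proofs are below) =====
def Claim_equal_get_path_to_tile_py : Prop := ∀ (tile_index : Int), Dom_get_path_to_tile_py tile_index → Spec_get_path_to_tile_py tile_index (get_path_to_tile_py tile_index)

-- ===== LEMMAS AND PROOFS =====

theorem pvIsqrt_spec (n : Nat) : pvIsqrt n * pvIsqrt n ≤ n ∧ n < (pvIsqrt n + 1) * (pvIsqrt n + 1) := by
  induction n using Nat.strong_induction_on with
  | _ n ih =>
    rw [pvIsqrt]
    by_cases h : n < 1
    · simp only [if_pos h]; omega
    · have ih4 := ih (n / 4) (Nat.div_lt_self (by omega) (by norm_num))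
      simp only [if_neg h]
      have h4 : n / 4 * 4 ≤ n ∧ n < (n / 4 + 1) * 4 := by omega
      set r := pvIsqrt (n / 4) with hr
      by_cases hle : (2 * r + 1) * (2 * r + 1) ≤ n
      · simp only [if_pos hle]; constructor
        · exact hle
        · nlinarith [ih4.2, h4.2]
      · simp only [if_neg hle]; constructor
        · nlinarith [ih4.1, h4.1]
        · omega

theorem pvIsqrt_unique (x a : Nat) (h1 : a * a ≤ x) (h2 : x < (a + 1) * (a + 1)) :
    pvIsqrt x = a := by
  have hs := pvIsqrt_spec x
  rcases Nat.lt_trichotomy (pvIsqrt x) a with h | h | h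
  · have : pvIsqrt x + 1 ≤ a := by omega
    nlinarith [hs.2]
  · exact h
  · have : a + 1 ≤ pvIsqrt x := by omega
    nlinarith [hs.1]

-- A's loop called on (m, lvl) computes the isqrt of m + lvl² and the remainder.
theorem pvLoopA_spec (m : Nat) (lvl : Nat) :
    pvLoopA (m : Int) lvl =
      (pvIsqrt (m + lvl * lvl),
       ((m + lvl * lvl : Nat) : Int) - (pvIsqrt (m + lvl * lvl) : Int) * (pvIsqrt (m + lvl * lvl) : Int)) := by
  induction m using Nat.strong_induction_on generalizing lvl with
  | _ m ih =>
    rw [pvLoopA]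
    by_cases h : 2 * (lvl : Int) + 1 ≤ (m : Int)
    · simp only [if_pos h]
      have hm : 2 * lvl + 1 ≤ m := by exact_mod_cast h
      have hcast : (m : Int) - (2 * (lvl : Int) + 1) = ((m - (2 * lvl + 1) : Nat) : Int) := by
        push_cast; omega
      rw [hcast, ih (m - (2 * lvl + 1)) (by omega) (lvl + 1)]
      have heq : m - (2 * lvl + 1) + (lvl + 1) * (lvl + 1) = m + lvl * lvl := by
        have : (lvl + 1) * (lvl + 1) = lvl * lvl + 2 * lvl + 1 := by ring
        omega
      rw [heq]
    · simp only [if_neg h]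
      have hm : m < 2 * lvl + 1 := by
        by_contra hc
        exact h (by exact_mod_cast (show (2 * lvl + 1 : Int) ≤ m by exact_mod_cast Nat.le_of_not_lt hc))
      have hq : pvIsqrt (m + lvl * lvl) = lvl := by
        apply pvIsqrt_unique
        · omega
        · nlinarith
      rw [hq]
      have h2 : ((m + lvl * lvl : Nat) : Int) - (lvl : Int) * (lvl : Int) = (m : Int) := by
        push_cast; ring
      rw [h2]

-- ===== VERDICT (by name: the statement is the Claim_ definition above) =====
theorem get_path_to_tile_py_spec : Claim_equal_get_path_to_tile_py := by
  intro n _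
  unfold Spec_get_path_to_tile_py get_path_to_tile_py get_path_to_tile_py_alt
  by_cases h : n ≤ 0
  · simp [h]
  · simp only [if_neg h]
    have hn : n = (n.toNat : Int) := by omega
    have hloop := pvLoopA_spec n.toNat 0
    simp only [Nat.mul_zero, Nat.add_zero] at hloop
    rw [hn, hloop]
    simp only [Int.toNat_natCast]
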